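-- pv_equiv track=rewrite | github.com/davidleon/Gaseous-Prime-Universe | core_tools/ilda_iterative_decomposer.py | count_provable_lemmas
-- ===== SOURCE A (Python) =====
-- from typing import Dict, List, Tuple
--
-- def count_provable_lemmas(all_lemmas: Dict) -> Tuple[int, int]:
--     """Count provable vs non-provable lemmas."""
--     provable = 0
--     total = 0
--
--     for category, lemmas in all_lemmas.items():
--         for lemma_name, lemma_data in lemmas.items():
--             total += 1
--             if lemma_data['difficulty'] in ['trivial', 'easy', 'medium']:
--                 provable += 1
--
--     return provable, total
-- ===== SOURCE B (Python) =====
-- def count_provable_lemmas(all_lemmas):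
--     """Count provable vs non-provable lemmas."""
--     def go(cats):
--         # recursion over the list of category dicts, built back-to-front;
--         # counts (hard, total) where hard = lemmas that are NOT provable
--         if not cats:
--             return (0, 0)
--         lemmas = cats[0]
--         hard, total = go(cats[1:])
--         for ld in lemmas.values():
--             if ld['difficulty'] not in ('trivial', 'easy', 'medium'):
--                 hard += 1
--         return (hard, total + len(lemmas))
--
--     hard, total = go(list(all_lemmas.values()))
--     return (total - hard, total)
-- ===== Notes on version B (the rewrite author's own statement) =====
-- stated objective: alternative
-- what changed: B counts the complement (non-provable lemmas) via an explicit recursion over the category list built back-to-front, and derives provable = total - hard by subtraction, instead of A's single forward loop directly incrementing a provable counter.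
import Mathlib
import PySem

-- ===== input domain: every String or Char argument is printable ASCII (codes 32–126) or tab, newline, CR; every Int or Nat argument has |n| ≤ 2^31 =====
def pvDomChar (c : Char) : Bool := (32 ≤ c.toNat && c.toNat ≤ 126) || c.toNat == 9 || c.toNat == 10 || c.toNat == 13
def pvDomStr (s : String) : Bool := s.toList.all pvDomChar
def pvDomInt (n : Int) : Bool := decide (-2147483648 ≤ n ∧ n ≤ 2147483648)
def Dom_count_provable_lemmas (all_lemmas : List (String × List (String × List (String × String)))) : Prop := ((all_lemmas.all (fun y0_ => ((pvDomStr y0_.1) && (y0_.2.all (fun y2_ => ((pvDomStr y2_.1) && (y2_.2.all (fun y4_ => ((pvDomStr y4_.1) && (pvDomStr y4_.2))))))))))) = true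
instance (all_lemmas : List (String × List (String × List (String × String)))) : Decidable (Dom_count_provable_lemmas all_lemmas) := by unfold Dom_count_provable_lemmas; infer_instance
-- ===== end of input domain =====

-- B counts the complement (hard lemmas) via an explicit recursion over categories and derives provable = total - hard by subtraction; objective: alternative, not faster.


-- ===== PORT A =====
-- first-match lookup = Python dict lookup ld['difficulty'] (raising form: none = KeyError)
def pvGetKey? (d : List (String × String)) (k : String) : Option String :=
  (d.find? (fun kv => kv.1 == k)).map (·.2)

-- A: one interleaved forward loop keeping (provable, total)
def count_provable_lemmas (all_lemmas : List (String × List (String × List (String × String)))) : Int × Int :=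
  all_lemmas.foldl
    (fun s cat =>
      cat.2.foldl
        (fun s l =>
          let total := s.2 + 1
          if ["trivial", "easy", "medium"].contains ((pvGetKey? l.2 "difficulty").getD "") then
            (s.1 + 1, total)
          else
            (s.1, total)) s)
    (0, 0)

-- ===== PORT B =====
-- l['difficulty'] not in ('trivial','easy','medium')
def pvHardB (l : String × List (String × String)) : Bool :=
  !(["trivial", "easy", "medium"].contains ((pvGetKey? l.2 "difficulty").getD ""))

-- the inner 'for ld in lemmas.values()' loop bumping hard
def goInnerB (ls : List (String × List (String × String))) (hard : Int) : Int :=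
  ls.foldl (fun h l => if pvHardB l then h + 1 else h) hard

-- go: recursion over the category list, built back-to-front, returning (hard, total)
def goB : List (String × List (String × List (String × String))) → Int × Int
  | [] => (0, 0)
  | c :: rest =>
    let p := goB rest
    (goInnerB c.2 p.1, p.2 + (c.2.length : Int))

def count_provable_lemmas_alt (all_lemmas : List (String × List (String × List (String × String)))) : Int × Int :=
  let p := goB all_lemmas
  (p.2 - p.1, p.2)

-- ===== PRECONDITION & SPEC =====
-- Pre_ excludes inputs where some lemma_data lacks the 'difficulty' key: there Python A raises KeyError (B too).
def Pre_count_provable_lemmas (all_lemmas : List (String × List (String × List (String × String)))) : Prop :=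
  (all_lemmas.all (fun cat => cat.2.all (fun l => l.2.any (fun kv => kv.1 == "difficulty")))) = true
instance (all_lemmas : List (String × List (String × List (String × String)))) : Decidable (Pre_count_provable_lemmas all_lemmas) := by unfold Pre_count_provable_lemmas; infer_instance
def pvWitness_count_provable_lemmas : (List (String × List (String × List (String × String)))) :=
  [("algebra", [("l1", [("difficulty", "easy")]), ("l2", [("difficulty", "hard")])]), ("geometry", [])]

def Spec_count_provable_lemmas (all_lemmas : List (String × List (String × List (String × String)))) (out : Int × Int) : Prop := out = count_provable_lemmas_alt all_lemmas
instance (all_lemmas : List (String × List (String × List (String × String)))) (out : Int × Int) : Decidable (Spec_count_provable_lemmas all_lemmas out) := by unfold Spec_count_provable_lemmas; infer_instance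

-- ===== CLAIM (what is proved, stated in full; the proofs are below) =====
def Claim_equal_count_provable_lemmas : Prop := ∀ (all_lemmas : List (String × List (String × List (String × String)))), Dom_count_provable_lemmas all_lemmas → Pre_count_provable_lemmas all_lemmas → Spec_count_provable_lemmas all_lemmas (count_provable_lemmas all_lemmas)

-- ===== LEMMAS AND PROOFS =====

def pvProv (l : String × List (String × String)) : Bool :=
  ["trivial", "easy", "medium"].contains ((pvGetKey? l.2 "difficulty").getD "")

theorem inner_fold_eq (ls : List (String × List (String × String))) (p t : Int) :
    ls.foldl (fun s l =>
        let total := s.2 + 1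
        if ["trivial", "easy", "medium"].contains ((pvGetKey? l.2 "difficulty").getD "") then
          (s.1 + 1, total) else (s.1, total)) (p, t)
      = (p + (ls.filter pvProv).length, t + ls.length) := by
  induction ls generalizing p t with
  | nil => simp
  | cons h tl ih =>
    simp only [List.foldl_cons]
    by_cases hp : pvProv h = true
    · rw [if_pos (by simpa [pvProv] using hp), ih, List.filter_cons, if_pos hp]
      refine Prod.ext ?_ ?_ <;> simp <;> omega
    · rw [if_neg (by simpa [pvProv] using hp), ih, List.filter_cons, if_neg hp]
      refine Prod.ext ?_ ?_ <;> simp <;> omega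

theorem count_fold_eq (xs : List (String × List (String × List (String × String)))) (p t : Int) :
    xs.foldl (fun s cat =>
        cat.2.foldl (fun s l =>
          let total := s.2 + 1
          if ["trivial", "easy", "medium"].contains ((pvGetKey? l.2 "difficulty").getD "") then
            (s.1 + 1, total) else (s.1, total)) s) (p, t)
      = (p + ((xs.flatMap (fun cat => cat.2)).filter pvProv).length,
         t + ((xs.flatMap (fun cat => cat.2)).length : Int)) := by
  induction xs generalizing p t with
  | nil => simp
  | cons h tl ih =>
    simp only [List.foldl_cons]
    rw [inner_fold_eq, ih]
    refine Prod.ext ?_ ?_ <;>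
      simp [List.flatMap_cons, List.filter_append] <;> omega

theorem goInnerB_eq (ls : List (String × List (String × String))) (h : Int) :
    goInnerB ls h = h + (ls.filter pvHardB).length := by
  induction ls generalizing h with
  | nil => simp [goInnerB]
  | cons x tl ih =>
    simp only [goInnerB, List.foldl_cons] at ih ⊢
    by_cases hx : pvHardB x = true
    · rw [if_pos hx, ih, List.filter_cons, if_pos hx]
      simp; omega
    · rw [if_neg hx, ih, List.filter_cons, if_neg hx]

theorem goB_eq (xs : List (String × List (String × List (String × String)))) :
    goB xs = ((((xs.flatMap (fun cat => cat.2)).filter pvHardB).length : Int),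
              ((xs.flatMap (fun cat => cat.2)).length : Int)) := by
  induction xs with
  | nil => simp [goB]
  | cons c rest ih =>
    simp only [goB, ih, goInnerB_eq, List.flatMap_cons, List.filter_append]
    refine Prod.ext ?_ ?_ <;> simp <;> omega

theorem filter_split (ls : List (String × List (String × String))) :
    (ls.filter pvProv).length + (ls.filter pvHardB).length = ls.length := by
  have hpb : ∀ l, pvHardB l = !(pvProv l) := fun l => rfl
  induction ls with
  | nil => simp
  | cons x tl ih =>
    simp only [List.filter_cons, hpb]
    by_cases hx : pvProv x = true <;> simp [hx, hpb] at ih ⊢ <;> omega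

-- ===== VERDICT (by name: the statement is the Claim_ definition above) =====
theorem count_provable_lemmas_spec : Claim_equal_count_provable_lemmas := by
  intro all_lemmas _ _
  unfold Spec_count_provable_lemmas count_provable_lemmas count_provable_lemmas_alt
  rw [count_fold_eq all_lemmas 0 0, goB_eq]
  have h := filter_split (all_lemmas.flatMap (fun cat => cat.2))
  refine Prod.ext ?_ ?_ <;> simp only [zero_add] <;> omega
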